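-- pv_equiv track=rewrite | github.com/Linux4/samsung_kernel | vendor/qcom/opensource/tools/linux-ramdump-parser-v2/parsers/usb.py | read_endpoint_mask
-- ===== SOURCE A (Python) =====
-- def read_endpoint_mask(mask):
--     """
--     Given a bitmask of endpoints (such as from struct usb_function), returns a string of all
--     endpoints used by the bitmask in ascending order, with outbound eps before inbound eps
--     :param mask: 32 bit mask representing
--     :return: String of format 'name1 name2 name3 ...'
--     """
--     ret = ""
--     for i in range(32):
--         if mask & (1 << i) == (1 << i):
--             io = "out "
--             if i >= 16:
--                 io = "in "
--             ret += "ep" + str(i % 16) + io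
--     return ret
-- ===== SOURCE B (Python) =====
-- def read_endpoint_mask(mask):
--     """
--     Build the endpoint-name string by extracting set bits of the 32-bit-normalized
--     mask one at a time (lowest first) instead of scanning all 32 positions.
--     """
--     mask &= 0xFFFFFFFF
--     ret = ""
--     while mask:
--         lsb = mask & -mask
--         i = lsb.bit_length() - 1
--         ret += "ep" + str(i % 16) + ("in " if i >= 16 else "out ")
--         mask ^= lsb
--     return ret
-- ===== Notes on version B (the rewrite author's own statement) =====
-- stated objective: alternative
-- what changed: Instead of testing every bit position of the fixed-width range in turn, B normalizes the mask to its low bits once and then extracts only the set bits, lowest first, via mask & -mask and bit_length, stopping as soon as the mask is exhausted.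
import Mathlib
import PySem

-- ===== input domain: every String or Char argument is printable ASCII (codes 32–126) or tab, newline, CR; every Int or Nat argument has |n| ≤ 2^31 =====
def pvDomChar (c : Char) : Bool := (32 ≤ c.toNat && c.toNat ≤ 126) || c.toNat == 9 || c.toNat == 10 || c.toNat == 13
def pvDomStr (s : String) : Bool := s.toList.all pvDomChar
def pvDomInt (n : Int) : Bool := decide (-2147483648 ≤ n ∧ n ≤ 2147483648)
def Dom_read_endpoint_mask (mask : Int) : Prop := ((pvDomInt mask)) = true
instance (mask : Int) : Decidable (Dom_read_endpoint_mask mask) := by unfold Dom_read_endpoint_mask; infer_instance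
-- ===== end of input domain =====

-- B replaces A's fixed scan of all 32 bit positions by lowest-set-bit extraction on the
-- 32-bit-normalized mask (alternative algorithm; equal return value on every input).

-- ===== PORT A =====
-- literal port of A: for i in range(32): if mask & (1 << i) == (1 << i): ret += "ep" + str(i % 16) + io
def read_endpoint_mask (mask : Int) : String :=
  (PySem.List.pyRange 0 32 1).foldl (fun ret i =>
    if PySem.Int.band mask (1 <<< i.toNat) = 1 <<< i.toNat then
      let io := if i ≥ 16 then "in " else "out "
      ret ++ ("ep" ++ PySem.Int.toStr (PySem.Int.mod i 16) ++ io)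
    else ret) ""

-- ===== PORT B =====
-- literal port of B's 'while mask:' loop; fuel 32 only makes the loop total (the normalized
-- mask has at most 32 set bits and loses one per iteration, so fuel is never exhausted)
def altLoop (fuel : Nat) (m : Int) (ret : String) : String :=
  match fuel with
  | 0 => ret
  | f + 1 =>
    if m = 0 then ret
    else
      let lsb := PySem.Int.band m (-m)
      let i : Int := (PySem.Int.bitLength lsb : Int) - 1
      altLoop f (PySem.Int.bxor m lsb)
        (ret ++ ("ep" ++ PySem.Int.toStr (PySem.Int.mod i 16) ++ (if i ≥ 16 then "in " else "out ")))

def read_endpoint_mask_alt (mask : Int) : String :=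
  altLoop 32 (PySem.Int.band mask 4294967295) ""

-- ===== PRECONDITION & SPEC =====
def Spec_read_endpoint_mask (mask : Int) (out : String) : Prop := out = read_endpoint_mask_alt mask
instance (mask : Int) (out : String) : Decidable (Spec_read_endpoint_mask mask out) := by unfold Spec_read_endpoint_mask; infer_instance

-- ===== CLAIM (what is proved, stated in full; the proofs are below) =====
def Claim_equal_read_endpoint_mask : Prop := ∀ (mask : Int), Dom_read_endpoint_mask mask → Spec_read_endpoint_mask mask (read_endpoint_mask mask)

-- ===== LEMMAS AND PROOFS =====

-- the string both programs emit for bit position k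
def pcPiece (k : Nat) : String :=
  "ep" ++ PySem.Int.toStr ((k % 16 : Nat) : Int) ++ (if 16 ≤ k then "in " else "out ")

-- the normalized 32-bit mask both sides effectively work on
def nrm (mask : Int) : Nat := (PySem.Int.band mask 4294967295).toNat

-- position of the lowest set bit (0 for n = 0)
def lowBit (n : Nat) : Nat :=
  if n % 2 = 1 ∨ n = 0 then 0 else lowBit (n / 2) + 1
  termination_by n
  decreasing_by exact Nat.div_lt_self (by omega) (by omega)

-- evaluation of PySem.Int.band in the two shapes the proofs meet
lemma band_negSucc_nat (b n : Nat) :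
    PySem.Int.band (Int.negSucc b) (Int.ofNat n) = Int.ofNat (n - (n &&& b)) := by
  have h1 : ¬ (0:Int) ≤ Int.negSucc b := by simp [Int.negSucc_eq]; omega
  have h2 : (0:Int) ≤ Int.ofNat n := by simp [Int.ofNat_eq_natCast]
  simp only [PySem.Int.band, if_neg h1, if_pos h2]
  have h3 : (-Int.negSucc b - 1).toNat = b := by simp [Int.negSucc_eq]
  have h4 : (Int.ofNat n).toNat = n := rfl
  rw [h3, h4]; rfl

lemma band_self_neg (a : Nat) (h : a ≠ 0) :
    PySem.Int.band (a : Int) (-(a : Int)) = ((a - (a &&& (a - 1)) : Nat) : Int) := by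
  have h1 : (0:Int) ≤ (a:Int) := by omega
  have h2 : ¬ (0:Int) ≤ -(a:Int) := by omega
  simp only [PySem.Int.band, if_pos h1, if_neg h2]
  have h3 : (-(-(a:Int)) - 1).toNat = a - 1 := by omega
  have h4 : ((a:Int)).toNat = a := by omega
  rw [h3, h4]

-- bit-recursion helpers for &&& and ldiff
lemma and_div_two (m n : Nat) : (m &&& n) / 2 = (m / 2) &&& (n / 2) := by
  apply Nat.eq_of_testBit_eq; intro i
  simp only [Nat.testBit_div_two, Nat.testBit_and]

lemma ldiff_div_two (m n : Nat) : (m.ldiff n) / 2 = (m / 2).ldiff (n / 2) := by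
  apply Nat.eq_of_testBit_eq; intro i
  simp only [Nat.testBit_div_two, Nat.testBit_ldiff]

lemma and_mod_two (m n : Nat) : ((m &&& n) % 2 = 1) ↔ (m % 2 = 1 ∧ n % 2 = 1) := by
  have h := Nat.testBit_and m n 0
  simp only [Nat.testBit_zero] at h
  have h2 := congrArg (fun b => b = true) h
  simp only [Bool.and_eq_true, decide_eq_true_eq, eq_iff_iff] at h2
  omega

lemma ldiff_mod_two (m n : Nat) : ((m.ldiff n) % 2 = 1) ↔ (m % 2 = 1 ∧ ¬ n % 2 = 1) := by
  have h := Nat.testBit_ldiff m n 0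
  simp only [Nat.testBit_zero] at h
  have h2 := congrArg (fun b => b = true) h
  simp only [Bool.and_eq_true, Bool.not_eq_true', decide_eq_true_eq, decide_eq_false_iff_not, eq_iff_iff] at h2
  omega

-- subtracting a sub-mask of n's bits is bitwise difference
lemma sub_and_eq_ldiff (n c : Nat) : n - (n &&& c) = n.ldiff c := by
  induction n using Nat.strong_induction_on generalizing c with
  | _ n ih =>
    match n with
    | 0 =>
      apply Nat.eq_of_testBit_eq; intro i
      simp [Nat.zero_and, Nat.testBit_ldiff, Nat.zero_testBit]
    | (m+1) =>
      have h1 := and_div_two (m+1) c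
      have h2 := ldiff_div_two (m+1) c
      have h3 := and_mod_two (m+1) c
      have h4 := ldiff_mod_two (m+1) c
      have h5 := ih ((m+1)/2) (by omega) (c/2)
      have h6 : (m+1)/2 &&& c/2 ≤ (m+1)/2 := Nat.and_le_left
      have h7 : (m+1) &&& c ≤ m+1 := Nat.and_le_left
      omega

lemma testBit_lowBit (n : Nat) (h : n ≠ 0) : n.testBit (lowBit n) = true := by
  induction n using Nat.strong_induction_on with
  | _ n ih =>
    rw [lowBit]
    split
    · next hc => simp [Nat.testBit_zero]; omega
    · next hc =>
      rw [Nat.testBit_add_one]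
      exact ih (n/2) (Nat.div_lt_self (by omega) (by omega)) (by omega)

lemma testBit_lt_lowBit (n : Nat) : ∀ i, i < lowBit n → n.testBit i = false := by
  induction n using Nat.strong_induction_on with
  | _ n ih =>
    intro i hi
    rw [lowBit] at hi
    split at hi
    · omega
    · next hc =>
      match i with
      | 0 => simp [Nat.testBit_zero]; omega
      | (j+1) =>
        rw [Nat.testBit_add_one]
        exact ih (n/2) (Nat.div_lt_self (by omega) (by omega)) j (by omega)

lemma ldiff_self (n : Nat) : n.ldiff n = 0 := by
  apply Nat.eq_of_testBit_eq; intro i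
  simp [Nat.testBit_ldiff, Nat.zero_testBit]

lemma ldiff_pred (n : Nat) (h : n ≠ 0) : n.ldiff (n - 1) = 2 ^ lowBit n := by
  induction n using Nat.strong_induction_on with
  | _ n ih =>
    rw [lowBit]
    split
    · next hc =>
      have hm := ldiff_mod_two n (n-1)
      have hd := ldiff_div_two n (n-1)
      have hds : (n-1)/2 = n/2 := by omega
      rw [hds, ldiff_self] at hd
      simp only [pow_zero]
      omega
    · next hc =>
      have hm := ldiff_mod_two n (n-1)
      have hd := ldiff_div_two n (n-1)
      have hds : (n-1)/2 = n/2 - 1 := by omega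
      rw [hds] at hd
      have hih := ih (n/2) (Nat.div_lt_self (by omega) (by omega)) (by omega)
      rw [hih] at hd
      have : 2 ^ (lowBit (n/2) + 1) = 2 * 2 ^ lowBit (n/2) := by ring
      omega

lemma sub_and_pred (n : Nat) (h : n ≠ 0) : n - (n &&& (n - 1)) = 2 ^ lowBit n := by
  rw [sub_and_eq_ldiff]; exact ldiff_pred n h

lemma bitLength_two_pow (k : Nat) : PySem.Int.bitLength ((2 ^ k : Nat) : Int) = k + 1 := by
  induction k with
  | zero => decide
  | succ j ih =>
    rw [PySem.Int.bitLength_natCast (by positivity)]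
    have : 2 ^ (j+1) / 2 = 2 ^ j := by rw [pow_succ]; omega
    rw [this, ih]

-- clearing the lowest set bit pops the head of the ascending set-bit list
lemma filter_step (a k : Nat) (hk : k < 32) (hbit : a.testBit k = true)
    (hlow : ∀ i, i < k → a.testBit i = false) :
    (List.range 32).filter a.testBit =
      k :: (List.range 32).filter (a ^^^ 2 ^ k).testBit := by
  have hxor : ∀ i, (a ^^^ 2 ^ k).testBit i = (a.testBit i).xor (decide (k = i)) := by
    intro i; simp [Nat.testBit_xor, Nat.testBit_two_pow]
  have hsplit : List.range 32 = List.range' 0 k ++ List.range' k (32 - k) := by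
    have h := List.range'_append (s:=0) (step:=1) (m:=k) (n:=32-k)
    simp only [Nat.zero_add, Nat.one_mul] at h
    rw [show k + (32 - k) = 32 from by omega] at h
    rw [List.range_eq_range']
    exact h.symm
  have hcons : List.range' k (32 - k) = k :: List.range' (k+1) (31 - k) := by
    have : 32 - k = (31 - k) + 1 := by omega
    rw [this, List.range'_succ]
  have hnil1 : (List.range' 0 k).filter a.testBit = [] := by
    apply List.filter_eq_nil_iff.mpr
    intro x hx
    have : x < k := by have := List.mem_range'_1.mp hx; omega
    simp [hlow x this]
  have hnil1' : (List.range' 0 k).filter (a ^^^ 2 ^ k).testBit = [] := by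
    apply List.filter_eq_nil_iff.mpr
    intro x hx
    have hxk : x < k := by have := List.mem_range'_1.mp hx; omega
    rw [hxor]; simp [hlow x hxk]; omega
  have htail : (List.range' (k+1) (31-k)).filter a.testBit
      = (List.range' (k+1) (31-k)).filter (a ^^^ 2 ^ k).testBit := by
    apply List.filter_congr
    intro x hx
    have : k + 1 ≤ x := (List.mem_range'_1.mp hx).1
    rw [hxor]
    have : (decide (k = x)) = false := by simp; omega
    simp [this]
  rw [hsplit, hcons]
  simp only [List.filter_append, List.filter_cons, hnil1, hnil1', hbit, hxor]
  simp only [List.nil_append]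
  have : ((a.testBit k).xor (decide (k = k))) = false := by simp [hbit]
  simp [htail]

-- B's loop emits exactly the pieces of the ascending set bits
lemma altLoop_eq (fuel : Nat) : ∀ (j a : Nat) (s : String),
    a < 2 ^ (fuel + j) → (∀ i, i < j → a.testBit i = false) →
    (∀ i, 32 ≤ i → a.testBit i = false) →
    altLoop fuel (a : Int) s =
      ((List.range 32).filter a.testBit).foldl (fun t k => t ++ pcPiece k) s := by
  induction fuel with
  | zero =>
    intro j a s hlt hlow _
    have ha : a = 0 := by
      apply Nat.eq_of_testBit_eq; intro i
      simp only [Nat.zero_testBit]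
      by_cases hij : i < j
      · exact hlow i hij
      · exact Nat.testBit_eq_false_of_lt (lt_of_lt_of_le hlt (Nat.pow_le_pow_right (by omega) (by omega)))
    subst ha
    have hnil : List.filter (Nat.testBit 0) (List.range 32) = [] := by
      simp [List.filter_eq_nil_iff, Nat.zero_testBit]
    simp [altLoop, hnil]
  | succ f ih =>
    intro j a s hlt hlow h32
    by_cases ha : a = 0
    · subst ha
      have hnil : List.filter (Nat.testBit 0) (List.range 32) = [] := by
        simp [List.filter_eq_nil_iff, Nat.zero_testBit]
      simp [altLoop, hnil]
    · rw [altLoop]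
      rw [if_neg (by exact_mod_cast ha)]
      set k := lowBit a with hkdef
      have hbit : a.testBit k = true := testBit_lowBit a ha
      have hk32 : k < 32 := by
        by_contra hge
        rw [h32 k (by omega)] at hbit; exact Bool.false_ne_true hbit
      have hkj : j ≤ k := by
        by_contra hlt'
        rw [hlow k (by omega)] at hbit; exact Bool.false_ne_true hbit
      have hlsb : PySem.Int.band (a : Int) (-(a : Int)) = ((2 ^ k : Nat) : Int) := by
        rw [band_self_neg a ha, sub_and_pred a ha]
      rw [hlsb]
      dsimp only
      rw [bitLength_two_pow]
      have hi : ((k + 1 : Nat) : Int) - 1 = (k : Nat) := by push_cast; ring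
      rw [hi]
      have hmod : PySem.Int.mod (k : Int) 16 = ((k % 16 : Nat) : Int) := by
        exact_mod_cast PySem.Int.mod_natCast k 16
      have hxor : PySem.Int.bxor (a : Int) ((2 ^ k : Nat) : Int) = ((a ^^^ 2 ^ k : Nat) : Int) :=
        PySem.Int.bxor_natCast a (2 ^ k)
      rw [hmod, hxor]
      have hpiece : ("ep" ++ PySem.Int.toStr ((k % 16 : Nat) : Int) ++
          (if (k : Int) ≥ 16 then "in " else "out ")) = pcPiece k := by
        unfold pcPiece
        congr 1
        split
        · next h => rw [if_pos (by exact_mod_cast h)]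
        · next h => rw [if_neg (by intro hc; exact h (by exact_mod_cast hc))]
      rw [hpiece]
      have hbit' : ∀ i, (a ^^^ 2 ^ k).testBit i = ((a.testBit i).xor (decide (k = i))) := by
        intro i; simp [Nat.testBit_xor, Nat.testBit_two_pow]
      have hlow' : ∀ i, i < k + 1 → (a ^^^ 2 ^ k).testBit i = false := by
        intro i hik
        rw [hbit']
        by_cases hik' : i = k
        · subst hik'; simp [hbit]
        · have : decide (k = i) = false := by simp; omega
          rw [this, testBit_lt_lowBit a i (by omega)]; rfl
      have h32' : ∀ i, 32 ≤ i → (a ^^^ 2 ^ k).testBit i = false := by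
        intro i hi32
        rw [hbit']
        have : decide (k = i) = false := by simp; omega
        rw [this, h32 i hi32]; rfl
      have hlt' : (a ^^^ 2 ^ k) < 2 ^ (f + (k + 1)) := by
        apply Nat.lt_pow_two_of_testBit
        intro i hi
        by_cases hik : i < 32
        · rw [hbit']
          have hne : decide (k = i) = false := by simp; omega
          rw [hne]
          have : a.testBit i = false := by
            apply Nat.testBit_eq_false_of_lt
            calc a < 2 ^ (f + 1 + j) := hlt
            _ ≤ 2 ^ i := Nat.pow_le_pow_right (by omega) (by omega)
          rw [this]; rfl
        · exact h32' i (by omega)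
      rw [filter_step a k hk32 hbit (testBit_lt_lowBit a)]
      simp only [List.foldl_cons]
      exact ih (k + 1) (a ^^^ 2 ^ k) _ hlt' hlow' h32'

lemma nrm_ofNat (n : Nat) : nrm (Int.ofNat n) = n &&& 4294967295 := by
  unfold nrm
  have : PySem.Int.band (Int.ofNat n) 4294967295 = ((n &&& 4294967295 : Nat) : Int) := by
    exact_mod_cast PySem.Int.band_natCast n 4294967295
  rw [this]; omega

lemma nrm_negSucc (b : Nat) : nrm (Int.negSucc b) = Nat.ldiff 4294967295 b := by
  unfold nrm
  have : (4294967295 : Int) = Int.ofNat 4294967295 := rfl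
  rw [this, band_negSucc_nat, sub_and_eq_ldiff]; rfl

lemma nrm_lt (mask : Int) : nrm mask < 2 ^ 32 := by
  cases mask with
  | ofNat n =>
    rw [nrm_ofNat]
    have : n &&& 4294967295 ≤ 4294967295 := Nat.and_le_right
    omega
  | negSucc b =>
    rw [nrm_negSucc, ← sub_and_eq_ldiff]
    omega

lemma band32_nonneg (mask : Int) : 0 ≤ PySem.Int.band mask 4294967295 := by
  cases mask with
  | ofNat n =>
    have : PySem.Int.band (Int.ofNat n) 4294967295 = ((n &&& 4294967295 : Nat) : Int) := by
      exact_mod_cast PySem.Int.band_natCast n 4294967295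
    rw [this]; omega
  | negSucc b =>
    have h : (4294967295 : Int) = Int.ofNat 4294967295 := rfl
    rw [h, band_negSucc_nat, Int.ofNat_eq_natCast]; omega

lemma band32_eq_nrm (mask : Int) : PySem.Int.band mask 4294967295 = ((nrm mask : Nat) : Int) :=
  (Int.toNat_of_nonneg (band32_nonneg mask)).symm

-- A's test of bit k equals the k-th bit of the normalized mask
lemma cond_iff (mask : Int) (k : Nat) (hk : k < 32) :
    (PySem.Int.band mask ((2 ^ k : Nat) : Int) = ((2 ^ k : Nat) : Int)) ↔
      (nrm mask).testBit k = true := by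
  have hm32 : (4294967295 : Nat) = 2 ^ 32 - 1 := by norm_num
  cases mask with
  | ofNat n =>
    have hb : PySem.Int.band (Int.ofNat n) ((2 ^ k : Nat) : Int) = ((n &&& 2 ^ k : Nat) : Int) := by
      exact_mod_cast PySem.Int.band_natCast n (2 ^ k)
    rw [hb, nrm_ofNat]
    rw [Nat.testBit_and, hm32, Nat.testBit_two_pow_sub_one]
    have hand := Nat.and_two_pow n k
    constructor
    · intro h
      have h' : n &&& 2 ^ k = 2 ^ k := by exact_mod_cast h
      cases hbt : n.testBit k
      · rw [hbt] at hand; simp at hand; rw [hand] at h'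
        have : 0 < 2 ^ k := Nat.two_pow_pos k
        omega
      · simp [hk]
    · intro h
      simp only [Bool.and_eq_true, decide_eq_true_eq] at h
      rw [hand, h.1]
      simp
  | negSucc b =>
    have hb : PySem.Int.band (Int.negSucc b) ((2 ^ k : Nat) : Int)
        = ((2 ^ k - (2 ^ k &&& b) : Nat) : Int) := by
      have : ((2 ^ k : Nat) : Int) = Int.ofNat (2 ^ k) := rfl
      rw [this, band_negSucc_nat]; rfl
    rw [hb, nrm_negSucc, Nat.testBit_ldiff, hm32, Nat.testBit_two_pow_sub_one]
    have hand := (Nat.two_pow_and (n:=b) (i:=k))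
    -- hand : 2 ^ k &&& b = 2 ^ k * (b.testBit k).toNat
    have hpos : 0 < 2 ^ k := Nat.two_pow_pos k
    have hle : 2 ^ k &&& b ≤ 2 ^ k := Nat.and_le_left
    simp only [hk, decide_true, Bool.true_and]
    constructor
    · intro h
      have h' : 2 ^ k - (2 ^ k &&& b) = 2 ^ k := by exact_mod_cast h
      cases hbt : b.testBit k
      · rfl
      · rw [hbt] at hand; simp at hand; omega
    · intro h
      simp only [Bool.not_eq_true'] at h
      rw [h] at hand; simp at hand; congr 1; omega

lemma A_eq (mask : Int) :
    read_endpoint_mask mask =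
      ((List.range 32).filter (nrm mask).testBit).foldl (fun t k => t ++ pcPiece k) "" := by
  unfold read_endpoint_mask
  rw [PySem.List.pyRange_one]
  have h32 : ((32:Int) - 0).toNat = 32 := by decide
  rw [h32, List.foldl_map, List.foldl_filter]
  apply PySem.List.foldl_congr_mem
  intro acc k hkmem
  have hk : k < 32 := List.mem_range.mp hkmem
  have hz : (0 : Int) + (k : Int) = (k : Int) := by ring
  rw [hz]
  have htn : ((k : Int)).toNat = k := by omega
  rw [htn]
  have hsh : (1 <<< k : Nat) = 2 ^ k := by simp [Nat.shiftLeft_eq]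
  rw [hsh]
  have hmod : PySem.Int.mod (k : Int) 16 = ((k % 16 : Nat) : Int) := by
    exact_mod_cast PySem.Int.mod_natCast k 16
  rw [hmod]
  by_cases hc : (nrm mask).testBit k = true
  · rw [if_pos ((cond_iff mask k hk).mpr hc), if_pos hc]
    dsimp only
    unfold pcPiece
    congr 2
    split
    · next h => rw [if_pos (by exact_mod_cast h)]
    · next h => rw [if_neg (by intro hcc; exact h (by exact_mod_cast hcc))]
  · rw [if_neg (fun h => hc ((cond_iff mask k hk).mp h)), if_neg hc]

lemma B_eq (mask : Int) :
    read_endpoint_mask_alt mask =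
      ((List.range 32).filter (nrm mask).testBit).foldl (fun t k => t ++ pcPiece k) "" := by
  unfold read_endpoint_mask_alt
  rw [band32_eq_nrm]
  apply altLoop_eq 32 0 (nrm mask) ""
  · simpa using nrm_lt mask
  · intro i hi; omega
  · intro i hi
    exact Nat.testBit_eq_false_of_lt
      (lt_of_lt_of_le (nrm_lt mask) (Nat.pow_le_pow_right (by omega) hi))

-- ===== VERDICT (by name: the statement is the Claim_ definition above) =====
theorem read_endpoint_mask_spec : Claim_equal_read_endpoint_mask := by
  intro mask _
  show read_endpoint_mask mask = read_endpoint_mask_alt mask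
  rw [A_eq, B_eq]
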